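-- pv_equiv track=rewrite | github.com/senthilts9/python-coding-challenges | Implementation/Emas Supercomputer.py | does_overlap
-- ===== SOURCE A (Python) =====
-- def does_overlap(p1, p2):
--     """Check if two pluses overlap in the grid."""
--     _, r1, c1, size1 = p1
--     _, r2, c2, size2 = p2
--
--     # Get all cells occupied by the first plus
--     cells1 = {(r1, c1)}
--     for i in range(1, size1 + 1):
--         cells1.update({(r1 + i, c1), (r1 - i, c1), (r1, c1 + i), (r1, c1 - i)})
--
--     # Check if any cell from plus2 is in plus1
--     if (r2, c2) in cells1:
--         return True
--     for i in range(1, size2 + 1):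
--         if {(r2 + i, c2), (r2 - i, c2), (r2, c2 + i), (r2, c2 - i)} & cells1:
--             return True
--
--     return False
-- ===== SOURCE B (Python) =====
-- def does_overlap(p1, p2):
--     """Check if two pluses overlap in the grid (O(1) interval arithmetic)."""
--     _, r1, c1, size1 = p1
--     _, r2, c2, size2 = p2
--     s1 = max(size1, 0)
--     s2 = max(size2, 0)
--     # Each plus = horizontal segment H (row r, cols [c-s, c+s])
--     #           + vertical segment  V (col c, rows [r-s, r+s]).
--     return ((r1 == r2 and abs(c1 - c2) <= s1 + s2) or   # H1 meets H2
--             (c1 == c2 and abs(r1 - r2) <= s1 + s2) or   # V1 meets V2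
--             (abs(c2 - c1) <= s1 and abs(r1 - r2) <= s2) or  # H1 meets V2 at (r1, c2)
--             (abs(c1 - c2) <= s2 and abs(r2 - r1) <= s1))    # V1 meets H2 at (r2, c1)
-- ===== Notes on version B (the rewrite author's own statement) =====
-- stated objective: faster
-- what changed: Replaces the set enumeration of all plus cells (O(size) set building and probing) with a closed-form O(1) geometric test: each plus is a horizontal and a vertical segment, and the four segment-pair intersection conditions are checked with interval arithmetic.
import Mathlib
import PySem

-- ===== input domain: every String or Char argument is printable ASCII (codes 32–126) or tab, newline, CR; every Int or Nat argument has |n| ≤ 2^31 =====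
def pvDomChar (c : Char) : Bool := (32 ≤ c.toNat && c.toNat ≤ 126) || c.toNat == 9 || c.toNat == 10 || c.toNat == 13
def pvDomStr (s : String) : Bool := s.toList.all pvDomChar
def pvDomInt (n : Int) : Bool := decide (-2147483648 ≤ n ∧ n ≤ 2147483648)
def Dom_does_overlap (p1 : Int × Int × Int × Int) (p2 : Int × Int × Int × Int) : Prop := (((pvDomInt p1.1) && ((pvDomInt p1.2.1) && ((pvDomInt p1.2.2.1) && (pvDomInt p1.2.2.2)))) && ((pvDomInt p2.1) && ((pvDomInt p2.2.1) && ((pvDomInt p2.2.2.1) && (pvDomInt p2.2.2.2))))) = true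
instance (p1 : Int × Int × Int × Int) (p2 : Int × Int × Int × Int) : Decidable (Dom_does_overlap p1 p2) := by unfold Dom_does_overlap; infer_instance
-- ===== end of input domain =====

-- B replaces A's cell-set enumeration with a closed-form O(1) segment-intersection test (measured asymptotically faster).


-- ===== PORT A =====
def does_overlap (p1 : Int × Int × Int × Int) (p2 : Int × Int × Int × Int) : Bool :=
  let (_, r1, c1, size1) := p1
  let (_, r2, c2, size2) := p2
  -- cells1 = {(r1, c1)}; for i in range(1, size1+1): cells1.update({…})
  let cells1 : PySem.Set (Int × Int) :=
    (PySem.List.pyRange 1 (size1 + 1) 1).foldl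
      (fun s i => PySem.Set.update s
        (PySem.Set.ofList [(r1 + i, c1), (r1 - i, c1), (r1, c1 + i), (r1, c1 - i)]))
      (PySem.Set.ofList [(r1, c1)])
  -- if (r2, c2) in cells1: return True
  if PySem.Set.contains cells1 (r2, c2) then true
  else
    -- for i in range(1, size2+1): if {…} & cells1: return True
    (PySem.List.pyRange 1 (size2 + 1) 1).any (fun i =>
      !(PySem.Set.inter
          (PySem.Set.ofList [(r2 + i, c2), (r2 - i, c2), (r2, c2 + i), (r2, c2 - i)])
          cells1).isEmpty)

-- ===== PORT B =====
def does_overlap_alt (p1 : Int × Int × Int × Int) (p2 : Int × Int × Int × Int) : Bool :=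
  let (_, r1, c1, size1) := p1
  let (_, r2, c2, size2) := p2
  let s1 := max size1 0
  let s2 := max size2 0
  ((r1 == r2) && decide (|c1 - c2| ≤ s1 + s2)) ||
  ((c1 == c2) && decide (|r1 - r2| ≤ s1 + s2)) ||
  (decide (|c2 - c1| ≤ s1) && decide (|r1 - r2| ≤ s2)) ||
  (decide (|c1 - c2| ≤ s2) && decide (|r2 - r1| ≤ s1))

-- ===== PRECONDITION & SPEC =====
def Spec_does_overlap (p1 : Int × Int × Int × Int) (p2 : Int × Int × Int × Int) (out : Bool) : Prop := out = does_overlap_alt p1 p2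
instance (p1 : Int × Int × Int × Int) (p2 : Int × Int × Int × Int) (out : Bool) : Decidable (Spec_does_overlap p1 p2 out) := by unfold Spec_does_overlap; infer_instance

-- ===== CLAIM (what is proved, stated in full; the proofs are below) =====
def Claim_equal_does_overlap : Prop := ∀ (p1 : Int × Int × Int × Int) (p2 : Int × Int × Int × Int), Dom_does_overlap p1 p2 → Spec_does_overlap p1 p2 (does_overlap p1 p2)

-- ===== LEMMAS AND PROOFS =====

-- (x, y) lies on the plus with center (r, c) and arm length max s 0.
def inPlus (r c s x y : Int) : Prop :=
  (x = r ∧ c - max s 0 ≤ y ∧ y ≤ c + max s 0) ∨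
  (y = c ∧ r - max s 0 ≤ x ∧ x ≤ r + max s 0)

lemma mem_foldl_update {α β : Type} [BEq α] [LawfulBEq α]
    (l : List β) (F : β → List α) (s0 : List α) (p : α) :
    p ∈ l.foldl (fun s i => PySem.Set.update s (F i)) s0 ↔ p ∈ s0 ∨ ∃ i ∈ l, p ∈ F i := by
  induction l generalizing s0 with
  | nil => simp
  | cons a t ih => simp [ih, PySem.Set.mem_update]; tauto

lemma mem_cells (r c s x y : Int) :
    (x, y) ∈ (PySem.List.pyRange 1 (s + 1) 1).foldl
      (fun st i => PySem.Set.update st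
        (PySem.Set.ofList [(r + i, c), (r - i, c), (r, c + i), (r, c - i)]))
      (PySem.Set.ofList [(r, c)]) ↔ inPlus r c s x y := by
  rw [mem_foldl_update]
  simp only [PySem.Set.mem_ofList, PySem.List.mem_pyRange_one, List.mem_cons,
    List.not_mem_nil, or_false, Prod.mk.injEq]
  constructor
  · rintro (⟨hx, hy⟩ | ⟨i, hi, h4⟩)
    · left; omega
    · unfold inPlus; rcases h4 with ⟨hx, hy⟩ | ⟨hx, hy⟩ | ⟨hx, hy⟩ | ⟨hx, hy⟩ <;> omega
  · rintro (⟨hx, hlo, hhi⟩ | ⟨hy, hlo, hhi⟩)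
    · by_cases hyc : y = c
      · left; exact ⟨hx, hyc⟩
      · right
        by_cases hgt : c < y
        · exact ⟨y - c, by omega, by right; right; left; constructor <;> omega⟩
        · exact ⟨c - y, by omega, by right; right; right; constructor <;> omega⟩
    · by_cases hxr : x = r
      · left; exact ⟨hxr, hy⟩
      · right
        by_cases hgt : r < x
        · exact ⟨x - r, by omega, by left; constructor <;> omega⟩
        · exact ⟨r - x, by omega, by right; left; constructor <;> omega⟩

-- A returns true iff some cell lies on both pluses.
lemma A_iff (id1 r1 c1 s1 id2 r2 c2 s2 : Int) :
    does_overlap (id1, r1, c1, s1) (id2, r2, c2, s2) = true ↔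
    ∃ x y, inPlus r1 c1 s1 x y ∧ inPlus r2 c2 s2 x y := by
  unfold does_overlap
  simp only
  split_ifs with h
  · simp only [true_iff]
    rw [PySem.Set.contains_iff, mem_cells] at h
    exact ⟨r2, c2, h, Or.inl ⟨rfl, by omega⟩⟩
  · rw [PySem.Set.contains_iff, mem_cells] at h
    rw [List.any_eq_true]
    constructor
    · rintro ⟨i, hi, hne⟩
      rw [PySem.List.mem_pyRange_one] at hi
      simp only [Bool.not_eq_true', List.isEmpty_eq_false_iff_exists_mem] at hne
      obtain ⟨p, hp⟩ := hne
      rw [PySem.Set.mem_inter] at hp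
      obtain ⟨hp2, hp1⟩ := hp
      simp only [PySem.Set.mem_ofList, List.mem_cons, List.not_mem_nil, or_false] at hp2
      obtain ⟨x, y⟩ := p
      rw [mem_cells] at hp1
      refine ⟨x, y, hp1, ?_⟩
      unfold inPlus
      rcases hp2 with h2 | h2 | h2 | h2 <;>
        simp only [Prod.mk.injEq] at h2 <;> omega
    · rintro ⟨x, y, hp1, hp2⟩
      unfold inPlus at hp2
      rcases hp2 with ⟨hx, hlo, hhi⟩ | ⟨hy, hlo, hhi⟩
      · -- point on the horizontal segment of plus2; y ≠ c2, else it is the excluded center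
        have hync : y ≠ c2 := fun hyc => h (by rw [← hx, ← hyc]; exact hp1)
        refine ⟨if c2 < y then y - c2 else c2 - y, ?_, ?_⟩
        · rw [PySem.List.mem_pyRange_one]; split_ifs <;> omega
        · simp only [Bool.not_eq_true', List.isEmpty_eq_false_iff_exists_mem]
          refine ⟨(x, y), ?_⟩
          rw [PySem.Set.mem_inter, mem_cells]
          refine ⟨?_, hp1⟩
          simp only [PySem.Set.mem_ofList, List.mem_cons, List.not_mem_nil, or_false, Prod.mk.injEq]
          split_ifs with hlt
          · right; right; left; omega
          · right; right; right; omega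
      · have hxnr : x ≠ r2 := fun hxr => h (by rw [← hxr, ← hy]; exact hp1)
        refine ⟨if r2 < x then x - r2 else r2 - x, ?_, ?_⟩
        · rw [PySem.List.mem_pyRange_one]; split_ifs <;> omega
        · simp only [Bool.not_eq_true', List.isEmpty_eq_false_iff_exists_mem]
          refine ⟨(x, y), ?_⟩
          rw [PySem.Set.mem_inter, mem_cells]
          refine ⟨?_, hp1⟩
          simp only [PySem.Set.mem_ofList, List.mem_cons, List.not_mem_nil, or_false, Prod.mk.injEq]
          split_ifs with hlt
          · left; omega
          · right; left; omega

-- B returns true iff some cell lies on both pluses.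
lemma B_iff (id1 r1 c1 s1 id2 r2 c2 s2 : Int) :
    does_overlap_alt (id1, r1, c1, s1) (id2, r2, c2, s2) = true ↔
    ∃ x y, inPlus r1 c1 s1 x y ∧ inPlus r2 c2 s2 x y := by
  unfold does_overlap_alt
  simp only [Bool.or_eq_true, Bool.and_eq_true, beq_iff_eq, decide_eq_true_eq, abs_le]
  constructor
  · rintro (((⟨hr, h⟩ | ⟨hc, h⟩) | ⟨h1, h2⟩) | ⟨h1, h2⟩)
    · exact ⟨r1, max (c1 - max s1 0) (min (c1 + max s1 0) c2), Or.inl ⟨rfl, by omega⟩,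
        Or.inl ⟨hr, by omega⟩⟩
    · exact ⟨max (r1 - max s1 0) (min (r1 + max s1 0) r2), c1, Or.inr ⟨rfl, by omega⟩,
        Or.inr ⟨hc, by omega⟩⟩
    · exact ⟨r1, c2, Or.inl ⟨rfl, by omega⟩, Or.inr ⟨rfl, by omega⟩⟩
    · exact ⟨r2, c1, Or.inr ⟨rfl, by omega⟩, Or.inl ⟨rfl, by omega⟩⟩
  · rintro ⟨x, y, h1 | h1, h2 | h2⟩ <;> omega

-- ===== VERDICT (by name: the statement is the Claim_ definition above) =====
theorem does_overlap_spec : Claim_equal_does_overlap := by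
  intro p1 p2 _
  obtain ⟨id1, r1, c1, s1⟩ := p1
  obtain ⟨id2, r2, c2, s2⟩ := p2
  unfold Spec_does_overlap
  by_cases h : ∃ x y, inPlus r1 c1 s1 x y ∧ inPlus r2 c2 s2 x y
  · rw [(A_iff id1 r1 c1 s1 id2 r2 c2 s2).mpr h, ((B_iff id1 r1 c1 s1 id2 r2 c2 s2).mpr h).symm]
  · have ha := (A_iff id1 r1 c1 s1 id2 r2 c2 s2).not.mpr h
    have hb := (B_iff id1 r1 c1 s1 id2 r2 c2 s2).not.mpr h
    simp only [Bool.not_eq_true] at ha hb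
    rw [ha, hb]
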